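-- pv_equiv track=rewrite | github.com/luisaaznarb-debug/Tutorin-api | logic/domains/matematicas/subtraction_engine.py | _compute_columns
-- ===== SOURCE A (Python) =====
-- from typing import List, Tuple, Optional
--
-- _PLACES = [
--     "unidades", "decenas", "centenas", "millares", "decenas de millar",
--     "centenas de millar", "millones"
-- ]
--
-- def _place_name(k: int) -> str:
--     return _PLACES[k] if k < len(_PLACES) else f"posición {k}"
--
-- def _digits_rev(n: int) -> List[int]:
--     return [int(ch) for ch in str(n)][::-1]
--
-- def _compute_columns(a: int, b: int):
--     A = _digits_rev(a)
--     B = _digits_rev(b)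
--     n = max(len(A), len(B))
--     cols = []
--     borrow = 0
--     for k in range(n):
--         d1 = A[k] if k < len(A) else 0
--         d2 = B[k] if k < len(B) else 0
--         raw = d1 - borrow - d2
--         if raw < 0:
--             digit = raw + 10
--             borrow = 1
--         else:
--             digit = raw
--             borrow = 0
--         cols.append((d1, d2, digit, _place_name(k)))
--     return cols
-- ===== SOURCE B (Python) =====
-- from typing import List, Tuple, Optional
--
-- _PLACES = [
--     "unidades", "decenas", "centenas", "millares", "decenas de millar",
--     "centenas de millar", "millones"
-- ]
--
-- def _place_name(k: int) -> str:
--     return _PLACES[k] if k < len(_PLACES) else f"posición {k}"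
--
-- def _digits_rev(n: int) -> List[int]:
--     return [int(ch) for ch in str(n)][::-1]
--
-- def _compute_columns(a: int, b: int):
--     # tens-complement closed form: no sequential borrow propagation
--     A = _digits_rev(a)
--     B = _digits_rev(b)
--     n = max(len(A), len(B))
--     diff = (a - b) % (10 ** n)
--     return [(A[k] if k < len(A) else 0,
--              B[k] if k < len(B) else 0,
--              diff // 10 ** k % 10,
--              _place_name(k)) for k in range(n)]
-- ===== Notes on version B (the rewrite author's own statement) =====
-- stated objective: simpler
-- what changed: The sequential borrow-propagation loop (mutable borrow variable updated column by column) is replaced by the closed-form tens-complement extraction: diff = (a-b) mod 10^n is computed once and the k-th column digit is diff // 10^k % 10, so the comprehension has no loop-carried state.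
import Mathlib
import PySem

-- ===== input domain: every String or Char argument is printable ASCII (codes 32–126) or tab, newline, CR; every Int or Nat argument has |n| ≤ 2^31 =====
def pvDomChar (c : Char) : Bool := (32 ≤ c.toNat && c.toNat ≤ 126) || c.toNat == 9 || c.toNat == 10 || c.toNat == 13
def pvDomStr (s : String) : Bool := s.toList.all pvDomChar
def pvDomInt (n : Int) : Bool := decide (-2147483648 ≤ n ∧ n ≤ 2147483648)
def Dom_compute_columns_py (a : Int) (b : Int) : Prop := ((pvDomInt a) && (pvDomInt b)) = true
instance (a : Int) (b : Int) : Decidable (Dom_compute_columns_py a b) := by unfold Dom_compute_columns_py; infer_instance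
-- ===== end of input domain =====

-- B replaces A's sequential borrow propagation by the closed-form tens-complement digit
-- extraction diff = (a-b) mod 10^n, diff // 10^k % 10 (objective: simpler; same return value).

-- ===== PORT A =====
-- _PLACES
def pvPLACES : List String :=
  ["unidades", "decenas", "centenas", "millares", "decenas de millar",
   "centenas de millar", "millones"]

-- _place_name  (callers only pass 0 ≤ k, where pyGet? is some; .getD "" is unreachable there)
def placeName (k : Int) : String :=
  if k < (pvPLACES.length : Int) then (PySem.List.pyGet? pvPLACES k).getD ""
  else "posición " ++ PySem.Int.toStr k

-- _digits_rev  (int(ch) = ofChars? [ch]; none — Python's ValueError on '-' — only outside Pre_,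
-- where .getD 0 is unreachable)
def digitsRevPy (n : Int) : List Int :=
  ((PySem.Int.toChars n).map (fun ch => (PySem.Int.ofChars? [ch]).getD 0)).reverse

-- the 'for k in range(n)' loop of A with its cols/borrow state
def aLoop (A B : List Int) (n : Nat) (k : Nat) (borrow : Int)
    (cols : List (Int × Int × Int × String)) : List (Int × Int × Int × String) :=
  if k < n then
    let d1 := PySem.List.pyGetD A (k : Int) 0
    let d2 := PySem.List.pyGetD B (k : Int) 0
    let raw := d1 - borrow - d2
    let digit := if raw < 0 then raw + 10 else raw
    let borrow' : Int := if raw < 0 then 1 else 0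
    aLoop A B n (k + 1) borrow' (cols ++ [(d1, d2, digit, placeName (k : Int))])
  else cols
termination_by n - k

def compute_columns_py (a : Int) (b : Int) : List (Int × Int × Int × String) :=
  let A := digitsRevPy a
  let B := digitsRevPy b
  let n := max A.length B.length
  aLoop A B n 0 0 []

-- ===== PORT B =====
def compute_columns_py_alt (a : Int) (b : Int) : List (Int × Int × Int × String) :=
  let A := digitsRevPy a
  let B := digitsRevPy b
  let n := max A.length B.length
  let diff := PySem.Int.mod (a - b) (10 ^ n)
  (List.range n).map (fun (k : Nat) =>
    (PySem.List.pyGetD A (k : Int) 0, PySem.List.pyGetD B (k : Int) 0,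
     PySem.Int.mod (PySem.Int.floordiv diff ((10:Int) ^ k)) 10, placeName (k : Int)))

-- ===== PRECONDITION & SPEC =====
-- A raises ValueError (int('-')) exactly when a or b is negative; Pre_ excludes only that.
def Pre_compute_columns_py (a : Int) (b : Int) : Prop := 0 ≤ a ∧ 0 ≤ b
instance (a : Int) (b : Int) : Decidable (Pre_compute_columns_py a b) := by
  unfold Pre_compute_columns_py; infer_instance
def pvWitness_compute_columns_py : Int × Int := (103, 58)

def Spec_compute_columns_py (a : Int) (b : Int) (out : List (Int × Int × Int × String)) : Prop := out = compute_columns_py_alt a b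
instance (a : Int) (b : Int) (out : List (Int × Int × Int × String)) : Decidable (Spec_compute_columns_py a b out) := by unfold Spec_compute_columns_py; infer_instance

-- ===== CLAIM (what is proved, stated in full; the proofs are below) =====
def Claim_equal_compute_columns_py : Prop := ∀ (a : Int) (b : Int), Dom_compute_columns_py a b → Pre_compute_columns_py a b → Spec_compute_columns_py a b (compute_columns_py a b)

-- ===== LEMMAS AND PROOFS =====

-- reversed decimal digits of a Nat, least significant first (proof-side model of _digits_rev)
def revDigits (m : Nat) : List Nat :=
  m % 10 :: (if h : m < 10 then [] else revDigits (m / 10))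
termination_by m
decreasing_by exact Nat.div_lt_self (by omega) (by omega)

lemma revDigits_lt10 (m : Nat) : ∀ e ∈ revDigits m, e < 10 := by
  induction m using Nat.strong_induction_on with
  | _ m ih =>
    rw [revDigits]
    intro e he
    rcases List.mem_cons.mp he with h | h
    · omega
    · split at h
      · simp at h
      · exact ih (m / 10) (Nat.div_lt_self (by omega) (by omega)) e h

lemma revDigits_getD (m k : Nat) : (revDigits m).getD k 0 = m / 10 ^ k % 10 := by
  induction m using Nat.strong_induction_on generalizing k with
  | _ m ih =>
    rw [revDigits]
    cases k with
    | zero => simp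
    | succ k =>
      have hdd : m / 10 ^ (k + 1) = m / 10 / 10 ^ k := by
        rw [Nat.div_div_eq_div_mul, pow_succ, mul_comm (10 ^ k) 10, ← Nat.div_div_eq_div_mul]
      split_ifs with h
      · have h0 : m / 10 = 0 := by omega
        simp [hdd, h0]
      · simpa [hdd] using ih (m / 10) (Nat.div_lt_self (by omega) (by omega)) k

lemma revDigits_len_le (m : Nat) : (revDigits m).length ≤ m + 1 := by
  induction m using Nat.strong_induction_on with
  | _ m ih =>
    rw [revDigits]
    split_ifs with h
    · simp
    · have := ih (m / 10) (Nat.div_lt_self (by omega) (by omega))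
      simp only [List.length_cons]
      omega

lemma toDigitsCore_eq (fuel : Nat) : ∀ (m : Nat) (ds : List Char),
    (revDigits m).length ≤ fuel →
    Nat.toDigitsCore 10 fuel m ds = ((revDigits m).map Nat.digitChar).reverse ++ ds := by
  induction fuel with
  | zero =>
    intro m ds h
    rw [revDigits] at h
    simp at h
  | succ fuel ih =>
    intro m ds h
    rw [Nat.toDigitsCore]
    split_ifs with h0
    · have h10 : m < 10 := by omega
      rw [revDigits]
      simp [h10]
    · have h10 : ¬ m < 10 := by omega
      rw [ih (m / 10) _ (by rw [revDigits] at h; simp only [h10, dite_false, List.length_cons] at h; omega)]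
      conv_rhs => rw [revDigits]
      simp [h10]

lemma toDigits_eq (m : Nat) : Nat.toDigits 10 m = ((revDigits m).map Nat.digitChar).reverse := by
  have h := toDigitsCore_eq (m + 1) m [] (by have := revDigits_len_le m; omega)
  simpa [Nat.toDigits] using h

lemma ofChars_digitChar (d : Nat) (hd : d < 10) :
    (PySem.Int.ofChars? [Nat.digitChar d]).getD 0 = (d : Int) := by
  interval_cases d <;> decide

lemma digitsRevPy_natCast (m : Nat) :
    digitsRevPy (m : Int) = List.map (fun d : Nat => (d : Int)) (revDigits m) := by
  unfold digitsRevPy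
  rw [PySem.Int.toChars, if_neg (not_lt.mpr (Int.natCast_nonneg m)), Int.toNat_natCast, toDigits_eq,
    List.map_reverse, List.reverse_reverse, List.map_map]
  exact List.map_congr_left (fun d hd => ofChars_digitChar d (revDigits_lt10 m d hd))

lemma digitsRevPy_getD (m k : Nat) :
    PySem.List.pyGetD (digitsRevPy (m : Int)) (k : Int) 0 = ((m / 10 ^ k % 10 : Nat) : Int) := by
  rw [digitsRevPy_natCast, PySem.List.pyGetD_natCast]
  have h0 : (0 : Int) = ((0 : Nat) : Int) := rfl
  rw [h0, List.getD_map (revDigits m) 0 (fun d : Nat => (d : Int)), revDigits_getD]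

-- euclidean decomposition of z mod 10P
lemma emod_decomp (z P : Int) (hz : 0 ≤ z) (hP : 0 < P) :
    z % (10 * P) = (z / P % 10) * P + z % P := by
  obtain ⟨zn, rfl⟩ := Int.eq_ofNat_of_zero_le hz
  obtain ⟨pn, rfl⟩ := Int.eq_ofNat_of_zero_le hP.le
  have h10 : ((10 : Nat) : Int) = (10 : Int) := rfl
  rw [← h10, ← Int.natCast_mul, ← Int.natCast_emod, ← Int.natCast_ediv, ← Int.natCast_emod,
    ← Int.natCast_emod, ← Int.natCast_mul, ← Int.natCast_add]
  congr 1
  have h1 : zn % (10 * pn) / pn = zn / pn % 10 := by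
    rw [mul_comm]; exact Nat.mod_mul_right_div_self zn pn 10
  have h2 : zn % (10 * pn) % pn = zn % pn := Nat.mod_mod_of_dvd zn ⟨10, mul_comm 10 pn⟩
  rw [← h1, ← h2]
  exact (Nat.div_add_mod' (zn % (10 * pn)) pn).symm

lemma ediv_extract (z P : Int) (hz : 0 ≤ z) (hP : 0 < P) :
    z % (10 * P) / P = z / P % 10 := by
  rw [emod_decomp z P hz hP, add_comm, mul_comm, Int.add_mul_ediv_left (z % P) (z / P % 10)
    (by omega), Int.ediv_eq_zero_of_lt (Int.emod_nonneg z (by omega)) (Int.emod_lt_of_pos z hP),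
    zero_add]

-- extracting digit q from q*P + r
lemma qPr (P q r : Int) (hP : 0 < P) (hq0 : 0 ≤ q) (hq : q < 10) (hr0 : 0 ≤ r) (hr : r < P) :
    (q * P + r) % (10 * P) / P = q ∧ 0 ≤ q * P + r ∧ q * P + r < 10 * P := by
  have h0 : 0 ≤ q * P := mul_nonneg hq0 hP.le
  have h9 : q * P ≤ 9 * P := mul_le_mul_of_nonneg_right (by omega) hP.le
  have hlt : q * P + r < 10 * P := by linarith
  have hge : 0 ≤ q * P + r := by linarith
  refine ⟨?_, hge, hlt⟩
  rw [Int.emod_eq_of_lt hge hlt, add_comm, mul_comm, Int.add_mul_ediv_left r q (by omega),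
    Int.ediv_eq_zero_of_lt hr0 hr, zero_add]

-- the single-column arithmetic fact: closed-form tens-complement digit = borrow-loop digit
lemma colStep (P x y d1 d2 : Int) (hP : 0 < P)
    (hx0 : 0 ≤ x) (hx : x < P) (hy0 : 0 ≤ y) (hy : y < P)
    (hd10 : 0 ≤ d1) (hd1 : d1 < 10) (hd20 : 0 ≤ d2) (hd2 : d2 < 10) :
    ((x + d1 * P) - (y + d2 * P)) % (10 * P) / P
      = (if d1 - (if x < y then (1:Int) else 0) - d2 < 0
         then d1 - (if x < y then (1:Int) else 0) - d2 + 10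
         else d1 - (if x < y then (1:Int) else 0) - d2)
    ∧ ((x + d1 * P) < (y + d2 * P) ↔ d1 - (if x < y then (1:Int) else 0) - d2 < 0) := by
  rcases lt_or_ge x y with hxy | hxy
  · rw [if_pos hxy]
    rcases lt_or_ge (d1 - 1 - d2) 0 with hneg | hneg
    · have h := qPr P (d1 - 1 - d2 + 10) (x - y + P) hP (by omega) (by omega) (by omega) (by omega)
      have hΔ : (x + d1 * P) - (y + d2 * P)
          = ((d1 - 1 - d2 + 10) * P + (x - y + P)) + (10 * P) * (-1) := by ring
      constructor
      · rw [if_pos hneg, hΔ, Int.add_mul_emod_self_left, h.1]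
      · exact iff_of_true (by linarith [h.2.2, hΔ]) hneg
    · have h := qPr P (d1 - 1 - d2) (x - y + P) hP (by omega) (by omega) (by omega) (by omega)
      have hΔ : (x + d1 * P) - (y + d2 * P) = (d1 - 1 - d2) * P + (x - y + P) := by ring
      constructor
      · rw [if_neg (not_lt.mpr hneg), hΔ, h.1]
      · exact iff_of_false (not_lt.mpr (by linarith [h.2.1, hΔ])) (not_lt.mpr hneg)
  · rw [if_neg (not_lt.mpr hxy)]
    rcases lt_or_ge (d1 - 0 - d2) 0 with hneg | hneg
    · have h := qPr P (d1 - d2 + 10) (x - y) hP (by omega) (by omega) (by omega) (by omega)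
      have hΔ : (x + d1 * P) - (y + d2 * P)
          = ((d1 - d2 + 10) * P + (x - y)) + (10 * P) * (-1) := by ring
      constructor
      · rw [if_pos hneg, hΔ, Int.add_mul_emod_self_left, h.1]; ring
      · exact iff_of_true (by linarith [h.2.2, hΔ]) hneg
    · have h := qPr P (d1 - d2) (x - y) hP (by omega) (by omega) (by omega) (by omega)
      have hΔ : (x + d1 * P) - (y + d2 * P) = (d1 - d2) * P + (x - y) := by ring
      constructor
      · rw [if_neg (not_lt.mpr hneg), hΔ, h.1]; ring
      · exact iff_of_false (not_lt.mpr (by linarith [h.2.1, hΔ])) (not_lt.mpr hneg)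

-- the column function B maps over range n
def colB (a b : Int) (n : Nat) (k : Nat) : Int × Int × Int × String :=
  (PySem.List.pyGetD (digitsRevPy a) (k : Int) 0, PySem.List.pyGetD (digitsRevPy b) (k : Int) 0,
   PySem.Int.mod (PySem.Int.floordiv (PySem.Int.mod (a - b) (10 ^ n)) (10 ^ k)) 10,
   placeName (k : Int))

lemma alt_eq (a b : Int) :
    compute_columns_py_alt a b =
      (List.range (max (digitsRevPy a).length (digitsRevPy b).length)).map
        (colB a b (max (digitsRevPy a).length (digitsRevPy b).length)) := by
  simp only [compute_columns_py_alt]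
  exact List.map_congr_left (fun k _ => rfl)

-- one unfolding step of A's loop
lemma aLoop_step {A B : List Int} {n k : Nat} {borrow : Int}
    {cols : List (Int × Int × Int × String)} (h : k < n) :
    aLoop A B n k borrow cols
      = aLoop A B n (k + 1)
          (if PySem.List.pyGetD A (k : Int) 0 - borrow - PySem.List.pyGetD B (k : Int) 0 < 0
           then 1 else 0)
          (cols ++ [(PySem.List.pyGetD A (k : Int) 0, PySem.List.pyGetD B (k : Int) 0,
            (if PySem.List.pyGetD A (k : Int) 0 - borrow - PySem.List.pyGetD B (k : Int) 0 < 0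
             then PySem.List.pyGetD A (k : Int) 0 - borrow - PySem.List.pyGetD B (k : Int) 0 + 10
             else PySem.List.pyGetD A (k : Int) 0 - borrow - PySem.List.pyGetD B (k : Int) 0),
            placeName (k : Int))]) := by
  rw [aLoop, if_pos h]

lemma aLoop_stop {A B : List Int} {n k : Nat} {borrow : Int}
    {cols : List (Int × Int × Int × String)} (h : ¬ k < n) :
    aLoop A B n k borrow cols = cols := by
  rw [aLoop, if_neg h]

-- the loop invariant: borrow = [a mod 10^k < b mod 10^k]
lemma aLoop_eq (α β : Nat) (n : Nat) :
    ∀ (j k : Nat), k + j = n → ∀ cols,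
      aLoop (digitsRevPy (α : Int)) (digitsRevPy (β : Int)) n k
        (if (α : Int) % (10:Int) ^ k < (β : Int) % (10:Int) ^ k then 1 else 0) cols
      = cols ++ (List.range' k j).map (colB (α : Int) (β : Int) n) := by
  intro j
  induction j with
  | zero =>
    intro k hk cols
    rw [aLoop_stop (by omega)]
    simp
  | succ j ih =>
    intro k hk cols
    have hkn : k < n := by omega
    rw [aLoop_step hkn]
    have hP : (0:Int) < (10:Int) ^ k := by positivity
    have hd1 : PySem.List.pyGetD (digitsRevPy (α : Int)) (k : Int) 0
        = (α : Int) / (10:Int) ^ k % 10 := by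
      rw [digitsRevPy_getD α k]; push_cast; ring
    have hd2 : PySem.List.pyGetD (digitsRevPy (β : Int)) (k : Int) 0
        = (β : Int) / (10:Int) ^ k % 10 := by
      rw [digitsRevPy_getD β k]; push_cast; ring
    have haP : (α : Int) % ((10:Int) * (10:Int) ^ k)
        = ((α:Int) / (10:Int) ^ k % 10) * (10:Int) ^ k + (α:Int) % (10:Int) ^ k :=
      emod_decomp _ _ (Int.natCast_nonneg α) hP
    have hbP : (β : Int) % ((10:Int) * (10:Int) ^ k)
        = ((β:Int) / (10:Int) ^ k % 10) * (10:Int) ^ k + (β:Int) % (10:Int) ^ k :=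
      emod_decomp _ _ (Int.natCast_nonneg β) hP
    have hcs := colStep ((10:Int) ^ k) ((α:Int) % (10:Int) ^ k) ((β:Int) % (10:Int) ^ k)
        ((α:Int) / (10:Int) ^ k % 10) ((β:Int) / (10:Int) ^ k % 10) hP
        (Int.emod_nonneg _ (by omega)) (Int.emod_lt_of_pos _ hP)
        (Int.emod_nonneg _ (by omega)) (Int.emod_lt_of_pos _ hP)
        (Int.emod_nonneg _ (by omega)) (Int.emod_lt_of_pos _ (by omega))
        (Int.emod_nonneg _ (by omega)) (Int.emod_lt_of_pos _ (by omega))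
    have hps : (10:Int) ^ (k + 1) = 10 * (10:Int) ^ k := by ring
    have hiff : ((α:Int) % (10:Int) ^ (k+1) < (β:Int) % (10:Int) ^ (k+1))
        ↔ ((α : Int) / (10:Int) ^ k % 10
            - (if (α:Int) % (10:Int) ^ k < (β:Int) % (10:Int) ^ k then 1 else 0)
            - (β : Int) / (10:Int) ^ k % 10 < 0) := by
      rw [hps, haP, hbP]
      constructor
      · intro h; exact hcs.2.mp (by linarith)
      · intro h; linarith [hcs.2.mpr h]
    have hb' : (if PySem.List.pyGetD (digitsRevPy (α : Int)) (k : Int) 0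
            - (if (α:Int) % (10:Int) ^ k < (β:Int) % (10:Int) ^ k then 1 else 0)
            - PySem.List.pyGetD (digitsRevPy (β : Int)) (k : Int) 0 < 0 then (1:Int) else 0)
        = (if (α:Int) % (10:Int) ^ (k+1) < (β:Int) % (10:Int) ^ (k+1) then 1 else 0) := by
      rw [hd1, hd2]
      exact (if_congr hiff rfl rfl).symm
    have hdig : (if PySem.List.pyGetD (digitsRevPy (α : Int)) (k : Int) 0
            - (if (α:Int) % (10:Int) ^ k < (β:Int) % (10:Int) ^ k then 1 else 0)
            - PySem.List.pyGetD (digitsRevPy (β : Int)) (k : Int) 0 < 0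
         then PySem.List.pyGetD (digitsRevPy (α : Int)) (k : Int) 0
            - (if (α:Int) % (10:Int) ^ k < (β:Int) % (10:Int) ^ k then 1 else 0)
            - PySem.List.pyGetD (digitsRevPy (β : Int)) (k : Int) 0 + 10
         else PySem.List.pyGetD (digitsRevPy (α : Int)) (k : Int) 0
            - (if (α:Int) % (10:Int) ^ k < (β:Int) % (10:Int) ^ k then 1 else 0)
            - PySem.List.pyGetD (digitsRevPy (β : Int)) (k : Int) 0)
        = PySem.Int.mod (PySem.Int.floordiv
            (PySem.Int.mod ((α:Int) - (β:Int)) ((10:Int) ^ n)) ((10:Int) ^ k)) 10 := by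
      rw [hd1, hd2]
      rw [PySem.Int.mod_eq_emod_of_pos (b := (10:Int) ^ n) (by positivity),
        PySem.Int.floordiv_eq_ediv_of_pos hP,
        PySem.Int.mod_eq_emod_of_pos (by omega : (0:Int) < 10)]
      have hD0 : (0:Int) ≤ ((α:Int) - (β:Int)) % (10:Int) ^ n :=
        Int.emod_nonneg _ (by positivity)
      rw [← ediv_extract _ _ hD0 hP]
      have hdvd : ((10:Int) * (10:Int) ^ k) ∣ (10:Int) ^ n := by
        refine ⟨(10:Int) ^ (n - k - 1), ?_⟩
        rw [show (10:Int) * (10:Int) ^ k = (10:Int) ^ (k + 1) by ring, ← pow_add]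
        congr 1
        omega
      rw [Int.emod_emod_of_dvd _ hdvd, Int.sub_emod ((α:Int)) ((β:Int)), haP, hbP,
        show ((α:Int) / (10:Int) ^ k % 10) * (10:Int) ^ k + (α:Int) % (10:Int) ^ k
            - (((β:Int) / (10:Int) ^ k % 10) * (10:Int) ^ k + (β:Int) % (10:Int) ^ k)
          = ((α:Int) % (10:Int) ^ k + ((α:Int) / (10:Int) ^ k % 10) * (10:Int) ^ k)
            - ((β:Int) % (10:Int) ^ k + ((β:Int) / (10:Int) ^ k % 10) * (10:Int) ^ k) by ring,
        hcs.1]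
    rw [hb', hdig, ih (k + 1) (by omega)]
    have hcol : (PySem.List.pyGetD (digitsRevPy (α : Int)) (k : Int) 0,
        PySem.List.pyGetD (digitsRevPy (β : Int)) (k : Int) 0,
        PySem.Int.mod (PySem.Int.floordiv
          (PySem.Int.mod ((α:Int) - (β:Int)) ((10:Int) ^ n)) ((10:Int) ^ k)) 10,
        placeName (k : Int)) = colB (α : Int) (β : Int) n k := rfl
    rw [hcol, List.range'_succ, List.map_cons]
    simp

-- ===== VERDICT (by name: the statement is the Claim_ definition above) =====
theorem compute_columns_py_spec : Claim_equal_compute_columns_py := by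
  intro a b hdom hpre
  obtain ⟨α, rfl⟩ := Int.eq_ofNat_of_zero_le hpre.1
  obtain ⟨β, rfl⟩ := Int.eq_ofNat_of_zero_le hpre.2
  unfold Spec_compute_columns_py
  rw [alt_eq]
  set n := max (digitsRevPy (α : Int)).length (digitsRevPy (β : Int)).length with hn
  have h := aLoop_eq α β n n 0 (by omega) []
  simp only [pow_zero, Int.emod_one, lt_irrefl, if_false] at h
  rw [show compute_columns_py (α : Int) (β : Int)
      = aLoop (digitsRevPy (α : Int)) (digitsRevPy (β : Int)) n 0 0 [] from rfl, h]
  simp [List.range_eq_range']
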